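-- pv_equiv track=rewrite | github.com/jw5374/InterviewLIbrary | leet/checkIfNumbersInSentenceAscending.py | areNumbersAscending
-- ===== SOURCE A (Python) =====
-- def areNumbersAscending(s: str) -> bool:
--     nums = [int(x) for x in s.split(" ") if x.isdigit()]
--     curNum = -1
--     for num in nums:
--         if curNum >= num:
--             return False
--         curNum = num
--     return True
-- ===== SOURCE B (Python) =====
-- def areNumbersAscending(s: str) -> bool:
--     nums = [int(x) for x in s.split(" ") if x.isdigit()]
--     return nums == sorted(set(nums))
-- ===== Notes on version B (the rewrite author's own statement) =====
-- stated objective: alternative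
-- what changed: Replaces A's sentinel-accumulator early-return scan with a canonicalization test: the token list is strictly ascending iff it equals sorted(set(nums)), i.e. deduplicate into a set, sort, and compare with the original list.
import Mathlib
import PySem

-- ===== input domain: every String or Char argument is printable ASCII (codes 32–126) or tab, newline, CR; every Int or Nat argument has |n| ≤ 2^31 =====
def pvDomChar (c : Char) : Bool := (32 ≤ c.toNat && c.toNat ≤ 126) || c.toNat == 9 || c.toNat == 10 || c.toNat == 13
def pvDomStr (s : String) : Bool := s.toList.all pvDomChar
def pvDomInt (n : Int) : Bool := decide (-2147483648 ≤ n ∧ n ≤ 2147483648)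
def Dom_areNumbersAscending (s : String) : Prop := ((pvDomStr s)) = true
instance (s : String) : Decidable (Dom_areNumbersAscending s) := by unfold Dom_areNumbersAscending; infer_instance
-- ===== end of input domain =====

-- B replaces A's sentinel-accumulator early-return loop with a canonicalization
-- test: the extracted numbers are strictly ascending iff they equal sorted(set(nums)).


-- ===== PORT A =====
-- shared token extraction: [int(x) for x in s.split(" ") if x.isdigit()]
-- (identical in A and B; ofStr? never returns none on an isdigit token)
def pvNums (s : String) : List Int :=
  ((PySem.Str.split? s " ").getD []).filterMap
    (fun x => if PySem.Str.strIsdigit x then PySem.Int.ofStr? x else none)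

-- A's loop: curNum accumulator with early return False
def pvLoopA : Int → List Int → Bool
  | _, [] => true
  | cur, n :: ns => if cur ≥ n then false else pvLoopA n ns

def areNumbersAscending (s : String) : Bool :=
  pvLoopA (-1) (pvNums s)

-- ===== PORT B =====
-- B: nums == sorted(set(nums))
def areNumbersAscending_alt (s : String) : Bool :=
  let nums := pvNums s
  decide (nums = PySem.List.sorted (PySem.Set.ofList nums) (fun x => x) false)

-- ===== PRECONDITION & SPEC =====
def Spec_areNumbersAscending (s : String) (out : Bool) : Prop := out = areNumbersAscending_alt s
instance (s : String) (out : Bool) : Decidable (Spec_areNumbersAscending s out) := by unfold Spec_areNumbersAscending; infer_instance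

-- ===== CLAIM (what is proved, stated in full; the proofs are below) =====
def Claim_equal_areNumbersAscending : Prop := ∀ (s : String), Dom_areNumbersAscending s → Spec_areNumbersAscending s (areNumbersAscending s)

-- ===== LEMMAS AND PROOFS =====

-- A's loop is Python's accumulator scan; it decides the chain relation cur < n1 < n2 < …
lemma pvLoopA_eq_chain (ns : List Int) (cur : Int) :
    pvLoopA cur ns = true ↔ List.IsChain (· < ·) (cur :: ns) := by
  induction ns generalizing cur with
  | nil => simp [pvLoopA]
  | cons n ns ih =>
    simp only [pvLoopA, List.isChain_cons_cons]
    by_cases h : cur ≥ n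
    · simp [h, show ¬ cur < n by omega]
    · simp [h, show cur < n by omega, ih n]

lemma drop_all_false {p : Char → Bool} {l : List Char} (h : ∀ c ∈ l, p c = false) :
    List.dropWhile p l = l := by
  cases l with
  | nil => rfl
  | cons a l => simp [List.dropWhile, h a (by simp)]

lemma ofChars?_nonneg_of_isdigit (cs : List Char) (v : Int)
    (hd : PySem.Chars.strIsdigit cs = true) (hv : PySem.Int.ofChars? cs = some v) :
    0 ≤ v := by
  simp only [PySem.Chars.strIsdigit, Bool.and_eq_true, List.all_eq_true] at hd
  obtain ⟨hne, hall⟩ := hd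
  have hsp : ∀ c ∈ cs, PySem.Int.isIntSpace c = false := by
    intro c hc
    have := hall c hc
    simp [PySem.Chars.isdigit] at this
    simp [PySem.Int.isIntSpace]
    refine ⟨⟨⟨⟨⟨?_,?_⟩,?_⟩,?_⟩,?_⟩,?_⟩ <;> rintro rfl <;> revert this <;> decide
  have h1 : List.dropWhile PySem.Int.isIntSpace cs = cs := drop_all_false hsp
  have h2 : List.dropWhile PySem.Int.isIntSpace cs.reverse = cs.reverse :=
    drop_all_false (by intro c hc; exact hsp c (by simpa using hc))
  simp only [PySem.Int.ofChars?, h1, h2, List.reverse_reverse] at hv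
  split at hv
  · exfalso; have := hall '-' (by simp); revert this; decide
  · exfalso; have := hall '+' (by simp); revert this; decide
  · simp only [Option.map_eq_some_iff] at hv
    obtain ⟨a, ha, rfl⟩ := hv
    simp only [bind, Option.bind_eq_some_iff] at ha
    obtain ⟨n, _, hn⟩ := ha
    cases hn
    positivity

-- a token accepted by isdigit parses to a nonnegative integer
lemma ofStr?_nonneg_of_isdigit (x : String) (v : Int)
    (hd : PySem.Str.strIsdigit x = true) (hv : PySem.Int.ofStr? x = some v) :
    0 ≤ v :=
  ofChars?_nonneg_of_isdigit x.toList v (by simpa using hd) hv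

lemma pvNums_nonneg (s : String) : ∀ v ∈ pvNums s, 0 ≤ v := by
  intro v hv
  simp only [pvNums, List.mem_filterMap] at hv
  obtain ⟨x, _, hx⟩ := hv
  split at hx
  · exact ofStr?_nonneg_of_isdigit x v (by assumption) hx
  · exact absurd hx (by simp)

-- the heart: for a list of nonnegatives, A's scan succeeds iff the list is its
-- own sorted deduplication
lemma loop_iff_canonical (ns : List Int) (hnn : ∀ v ∈ ns, 0 ≤ v) :
    (pvLoopA (-1) ns = true) ↔
      ns = PySem.List.sorted (PySem.Set.ofList ns) (fun x => x) false := by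
  rw [pvLoopA_eq_chain, List.isChain_iff_pairwise, List.pairwise_cons]
  constructor
  · rintro ⟨-, hp⟩
    have hnd : ns.Nodup := hp.imp (fun h => ne_of_lt h)
    rw [PySem.Set.ofList_eq_self_of_nodup ns hnd]
    exact (PySem.List.sorted_eq_self_of_pairwise ns _
      (hp.imp (fun h => le_of_lt h))).symm
  · intro h
    have hp : ns.Pairwise (· < ·) := by
      rw [h]; exact PySem.List.sorted_ofList_pairwise_lt ns
    exact ⟨fun x hx => by have := hnn x hx; omega, hp⟩

-- ===== VERDICT (by name: the statement is the Claim_ definition above) =====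
theorem areNumbersAscending_spec : Claim_equal_areNumbersAscending := by
  intro s _
  unfold Spec_areNumbersAscending areNumbersAscending areNumbersAscending_alt
  simp only
  rw [Bool.eq_iff_iff, decide_eq_true_iff]
  exact loop_iff_canonical (pvNums s) (pvNums_nonneg s)
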